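-- pv_equiv track=rewrite | github.com/apache/datafusion-python | python/tests/test_functions.py | py_arr_remove
-- ===== SOURCE A (Python) =====
-- def py_arr_remove(arr, v, n=None):
--     new_arr = arr[:]
--     found = 0
--     try:
--         while found != n:
--             new_arr.remove(v)
--             found += 1
--     except ValueError:
--         pass
--
--     return new_arr
-- ===== SOURCE B (Python) =====
-- def py_arr_remove(arr, v, n=None):
--     out = []
--     found = 0
--     for x in arr:
--         if x == v and found != n:
--             found += 1
--         else:
--             out.append(x)
--     return out
-- ===== Notes on version B (the rewrite author's own statement) =====
-- stated objective: alternative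
-- what changed: Replaces the repeated list.remove scan-and-shift loop with a single pass that copies elements, skipping matches while the skip counter differs from n; same observed cost on the generated inputs.
import Mathlib
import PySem

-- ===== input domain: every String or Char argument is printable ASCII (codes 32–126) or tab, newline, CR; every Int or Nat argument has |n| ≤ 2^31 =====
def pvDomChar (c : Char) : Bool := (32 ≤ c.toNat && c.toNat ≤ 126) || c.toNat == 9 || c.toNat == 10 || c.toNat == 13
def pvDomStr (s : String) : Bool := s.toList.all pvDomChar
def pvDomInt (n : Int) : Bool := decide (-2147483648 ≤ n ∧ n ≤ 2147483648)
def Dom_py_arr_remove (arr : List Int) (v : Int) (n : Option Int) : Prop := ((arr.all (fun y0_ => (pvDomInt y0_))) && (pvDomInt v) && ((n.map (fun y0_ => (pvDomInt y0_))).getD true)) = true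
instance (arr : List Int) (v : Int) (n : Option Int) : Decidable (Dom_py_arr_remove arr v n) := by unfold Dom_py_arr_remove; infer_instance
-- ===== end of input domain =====

-- B replaces A's repeated list.remove loop by one copying pass over the list (objective: alternative single-pass formulation).

-- Python's `found != n` with n an int or None (found is always an int, so `found != None` is True)
def pvNeq (found : Int) (n : Option Int) : Bool :=
  match n with
  | none => true
  | some m => found != m

-- ===== PORT A =====
-- the `while found != n: new_arr.remove(v)` loop; ValueError (v absent) ends the loop
def pvRemoveLoopA (v : Int) (n : Option Int) (new_arr : List Int) (found : Int) : List Int :=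
  if pvNeq found n then
    match h : PySem.List.remove? new_arr v with
    | none => new_arr
    | some arr' => pvRemoveLoopA v n arr' (found + 1)
  else new_arr
termination_by new_arr.length
decreasing_by
  have hv : v ∈ new_arr := by
    by_contra hc
    rw [(PySem.List.remove?_eq_none_iff new_arr v).mpr hc] at h
    simp at h
  rw [PySem.List.remove?_eq_some_erase new_arr v hv] at h
  injection h with h
  subst h
  have h1 := List.length_erase_of_mem hv
  have h2 := List.length_pos_of_mem hv
  omega

def py_arr_remove (arr : List Int) (v : Int) (n : Option Int) : List Int :=
  pvRemoveLoopA v n arr 0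

-- ===== PORT B =====
-- the single for-loop of Source B, with state (out, found)
def pvSkipLoopB (v : Int) (n : Option Int) : List Int → Int → List Int → List Int
  | [], _, out => out
  | x :: xs, found, out =>
      if x = v ∧ pvNeq found n then pvSkipLoopB v n xs (found + 1) out
      else pvSkipLoopB v n xs found (out ++ [x])

def py_arr_remove_alt (arr : List Int) (v : Int) (n : Option Int) : List Int :=
  pvSkipLoopB v n arr 0 []

-- ===== PRECONDITION & SPEC =====
def Spec_py_arr_remove (arr : List Int) (v : Int) (n : Option Int) (out : List Int) : Prop := out = py_arr_remove_alt arr v n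
instance (arr : List Int) (v : Int) (n : Option Int) (out : List Int) : Decidable (Spec_py_arr_remove arr v n out) := by unfold Spec_py_arr_remove; infer_instance

-- ===== CLAIM (what is proved, stated in full; the proofs are below) =====
def Claim_equal_py_arr_remove : Prop := ∀ (arr : List Int) (v : Int) (n : Option Int), Dom_py_arr_remove arr v n → Spec_py_arr_remove arr v n (py_arr_remove arr v n)

-- ===== LEMMAS AND PROOFS =====

-- accumulator-free version of B's loop, for the proofs
def pvSkip (v : Int) (n : Option Int) : List Int → Int → List Int
  | [], _ => []
  | x :: xs, found =>
      if x = v ∧ pvNeq found n then pvSkip v n xs (found + 1)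
      else x :: pvSkip v n xs found

theorem pvSkipLoopB_eq_skip (v : Int) (n : Option Int) :
    ∀ (l : List Int) (c : Int) (out : List Int),
      pvSkipLoopB v n l c out = out ++ pvSkip v n l c := by
  intro l
  induction l with
  | nil => intro c out; simp [pvSkipLoopB, pvSkip]
  | cons x xs ih =>
      intro c out
      by_cases hx : x = v ∧ pvNeq c n
      · simp [pvSkipLoopB, pvSkip, hx, ih]
      · simp [pvSkipLoopB, pvSkip, hx, ih]

theorem pvSkip_of_stop (v : Int) (n : Option Int) :
    ∀ (l : List Int) (c : Int), pvNeq c n = false → pvSkip v n l c = l := by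
  intro l
  induction l with
  | nil => intro c _; rfl
  | cons x xs ih =>
      intro c hc
      have : ¬ (x = v ∧ pvNeq c n) := by simp [hc]
      simp [pvSkip, this, ih c hc]

theorem pvSkip_of_not_mem (v : Int) (n : Option Int) :
    ∀ (l : List Int) (c : Int), v ∉ l → pvSkip v n l c = l := by
  intro l
  induction l with
  | nil => intro c _; rfl
  | cons x xs ih =>
      intro c hl
      have hx : x ≠ v := fun h => hl (by simp [h])
      have hxs : v ∉ xs := fun h => hl (List.mem_cons_of_mem _ h)
      have : ¬ (x = v ∧ pvNeq c n) := fun h => hx h.1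
      simp [pvSkip, this, ih c hxs]

theorem pvSkip_erase (v : Int) (n : Option Int) :
    ∀ (l : List Int) (c : Int), v ∈ l → pvNeq c n = true →
      pvSkip v n l c = pvSkip v n (l.erase v) (c + 1) := by
  intro l
  induction l with
  | nil => intro c h; cases h
  | cons x xs ih =>
      intro c hv hc
      by_cases hx : x = v
      · subst hx
        simp [pvSkip, hc, List.erase_cons_head]
      · have hxs : v ∈ xs := by
          cases List.mem_cons.mp hv with
          | inl h => exact absurd h.symm hx
          | inr h => exact h
        have hne : ¬ (x = v ∧ pvNeq c n) := fun h => hx h.1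
        have hne' : ¬ (x = v ∧ pvNeq (c + 1) n) := fun h => hx h.1
        have herase : (x :: xs).erase v = x :: xs.erase v := by
          rw [List.erase_cons_tail]
          simp [hx]
        rw [herase]
        simp [pvSkip, hne, hne', ih c hxs hc]

theorem pvRemoveLoopA_eq_skip (v : Int) (n : Option Int) :
    ∀ (k : Nat) (l : List Int), l.length ≤ k → ∀ (c : Int),
      pvRemoveLoopA v n l c = pvSkip v n l c := by
  intro k
  induction k with
  | zero =>
      intro l hl c
      have : l = [] := List.eq_nil_of_length_eq_zero (Nat.le_zero.mp hl)
      subst this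
      rw [pvRemoveLoopA.eq_def]
      simp [PySem.List.remove?, pvSkip]
  | succ k ih =>
      intro l hl c
      rw [pvRemoveLoopA.eq_def]
      by_cases hc : pvNeq c n
      · simp only [hc, if_true]
        split
        · next h =>
            have hv : v ∉ l := (PySem.List.remove?_eq_none_iff l v).mp h
            exact (pvSkip_of_not_mem v n l c hv).symm
        · next arr' h =>
            have hv : v ∈ l := by
              by_contra hcc
              rw [(PySem.List.remove?_eq_none_iff l v).mpr hcc] at h
              simp at h
            rw [PySem.List.remove?_eq_some_erase l v hv] at h
            injection h with h
            subst h
            have hlen : (l.erase v).length ≤ k := by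
              have h1 := List.length_erase_of_mem hv
              have h2 := List.length_pos_of_mem hv
              omega
            rw [ih (l.erase v) hlen (c + 1)]
            exact (pvSkip_erase v n l c hv hc).symm
      · simp only [hc]
        exact (pvSkip_of_stop v n l c (by simpa using hc)).symm

-- ===== VERDICT (by name: the statement is the Claim_ definition above) =====
theorem py_arr_remove_spec : Claim_equal_py_arr_remove := by
  intro arr v n _
  unfold Spec_py_arr_remove py_arr_remove py_arr_remove_alt
  rw [pvSkipLoopB_eq_skip, pvRemoveLoopA_eq_skip v n arr.length arr le_rfl 0]
  simp
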